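-- pv_equiv track=rewrite | github.com/jtauber/pyuca | pyuca/collator.py | sort_key_from_collation_elements
-- ===== SOURCE A (Python) =====
-- def sort_key_from_collation_elements(collation_elements,
--                                      max_level=4, level_sep=0):
--     """
--     Produce the sort key for a string from its array of collation elements.
--
--     Reference algorithm: https://www.unicode.org/reports/tr10/tr10-36.html#Step_3
--     """  # noqa: E501
--     sort_key = []
--
--     available_levels = max([len(ce) for ce in collation_elements])
--     for level in range(min(max_level, available_levels)):  # S3.1
--         if level > 0:  # S3.2
--             sort_key.append(level_sep)
--
--         # Assumption: collation element table is forwards (as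
--         # opposed to backwards) at this level.  This entails
--         # following branch S3.3 of the algorithm and ignoring
--         # branch S3.6 (and its children steps S3.7 S3.8 S3.9).
--         for ce in collation_elements:  # S3.4
--
--             # Not appending anything for collation elements
--             # without weight at this level is equivalent to
--             # defaulting such weight to zero - see S3.5.
--             if len(ce) > level:
--                 ce_l = ce[level]
--                 if ce_l > 0:  # S3.5
--                     sort_key.append(ce_l)
--
--     # According to the algorithm at
--     # https://www.unicode.org/reports/tr10/tr10-36.html#Step_3 the
--     # sort key does not have to end with a level separator.  See
--     # also examples at
--     # https://www.unicode.org/reports/tr10/tr10-36.html#Array_To_Sort_Key_Table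
--     # and
--     # https://www.unicode.org/reports/tr10/tr10-36.html#Comparison_Of_Sort_Keys_Table
--     #
--     # However the conformance tests at
--     # https://www.unicode.org/Public/UCA/10.0.0/CollationTest.html
--     # include in (non-normative) comments "a representation of the
--     # sort key" always ending with "|]" where the vertical bar
--     # stands for "the ZERO separator".
--     #
--     # Append a final unnecessary level separator for the sake of
--     # readability following the comments in the conformance tests.
--     # This entails unnecessary additional memory usage.
--     sort_key.append(level_sep)
--
--     # Assumption: no deterministic (sometimes called stable or
--     # semi-stable) comparison required.  This entails skipping
--     # step S3.10 of the algorithm.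
--
--     return tuple(sort_key)
-- ===== SOURCE B (Python) =====
-- def sort_key_from_collation_elements(collation_elements,
--                                      max_level=4, level_sep=0):
--     """Single-pass bucket version: one traversal of collation_elements
--     fills per-level weight buckets, then the key is assembled level by level."""
--     available_levels = max(len(ce) for ce in collation_elements)
--     num_levels = min(max_level, available_levels)
--     num = num_levels if num_levels > 0 else 0
--     buckets = [[] for _ in range(num)]
--     for ce in collation_elements:
--         for level in range(num):
--             if level < len(ce):
--                 w = ce[level]
--                 if w > 0:
--                     buckets[level].append(w)
--     key = []
--     for i, bucket in enumerate(buckets):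
--         if i > 0:
--             key.append(level_sep)
--         key.extend(bucket)
--     key.append(level_sep)
--     return tuple(key)
-- ===== Notes on version B (the rewrite author's own statement) =====
-- stated objective: alternative
-- what changed: Replaces A's per-level full rescan of collation_elements (levels outer, elements inner) with a single pass over the elements that fills per-level weight buckets, followed by a separate bucket-concatenation assembly step.
-- outside the precondition, e.g. on sort_key_from_collation_elements([], 4, 0): A raises ValueError, B raises ValueError
import Mathlib
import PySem

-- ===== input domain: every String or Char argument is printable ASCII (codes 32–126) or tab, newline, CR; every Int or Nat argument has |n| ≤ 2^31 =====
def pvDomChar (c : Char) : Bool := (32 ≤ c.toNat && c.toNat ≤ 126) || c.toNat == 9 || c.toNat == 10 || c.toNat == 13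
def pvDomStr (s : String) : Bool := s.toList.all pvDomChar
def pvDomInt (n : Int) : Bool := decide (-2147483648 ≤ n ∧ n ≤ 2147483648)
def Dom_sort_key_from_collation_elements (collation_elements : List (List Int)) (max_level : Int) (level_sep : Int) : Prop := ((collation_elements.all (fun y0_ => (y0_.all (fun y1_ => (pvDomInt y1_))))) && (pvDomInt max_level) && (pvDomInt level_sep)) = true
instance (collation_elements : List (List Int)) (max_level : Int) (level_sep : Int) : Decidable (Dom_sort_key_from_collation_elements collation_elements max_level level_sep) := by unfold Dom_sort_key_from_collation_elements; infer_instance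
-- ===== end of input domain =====

-- B builds every level's weight bucket in a single pass over the collation elements
-- and assembles the key from the buckets, instead of A's one full rescan per level (objective: alternative).

-- ===== PORT A =====
-- literal transliteration of A: per-level rescan of collation_elements
def sort_key_from_collation_elements (collation_elements : List (List Int)) (max_level : Int) (level_sep : Int) : List Int :=
  match PySem.List.max? (collation_elements.map (fun ce => (ce.length : Int))) (fun x => x) with
  | none => []  -- Python: max([]) raises ValueError; excluded by Pre_
  | some available_levels =>
    let sort_key :=
      (PySem.List.pyRange 0 (min max_level available_levels) 1).foldl
        (fun sk level =>
          let sk := if level > 0 then sk ++ [level_sep] else sk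
          collation_elements.foldl
            (fun sk ce =>
              if (ce.length : Int) > level then
                match PySem.List.pyGet? ce level with
                | some ce_l => if ce_l > 0 then sk ++ [ce_l] else sk
                | none => sk   -- unreachable under the length guard
              else sk)
            sk)
        []
    sort_key ++ [level_sep]

-- ===== PORT B =====
-- literal transliteration of B: one pass filling per-level buckets, then assembly
def sort_key_from_collation_elements_alt (collation_elements : List (List Int)) (max_level : Int) (level_sep : Int) : List Int :=
  match PySem.List.max? (collation_elements.map (fun ce => (ce.length : Int))) (fun x => x) with
  | none => []  -- Python: max of empty generator raises ValueError; excluded by Pre_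
  | some available_levels =>
    let num : Nat := (min max_level available_levels).toNat
    let buckets :=
      collation_elements.foldl
        (fun (bs : List (List Int)) ce =>
          bs.mapIdx (fun level b =>
            if level < ce.length then
              let w := ce.getD level 0
              if w > 0 then b ++ [w] else b
            else b))
        (List.replicate num [])
    let key :=
      match buckets with
      | [] => []
      | b0 :: rest => rest.foldl (fun acc b => acc ++ level_sep :: b) b0
    key ++ [level_sep]

-- ===== PRECONDITION & SPEC =====
-- Pre_ excludes only the empty list, on which Python A raises ValueError (max of an empty sequence).
def Pre_sort_key_from_collation_elements (collation_elements : List (List Int)) (max_level : Int) (level_sep : Int) : Prop :=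
  collation_elements ≠ []
instance (collation_elements : List (List Int)) (max_level : Int) (level_sep : Int) : Decidable (Pre_sort_key_from_collation_elements collation_elements max_level level_sep) := by unfold Pre_sort_key_from_collation_elements; infer_instance
def pvWitness_sort_key_from_collation_elements : List (List Int) × Int × Int := ([[5, 2], [7], []], 4, 0)

def Spec_sort_key_from_collation_elements (collation_elements : List (List Int)) (max_level : Int) (level_sep : Int) (out : List Int) : Prop := out = sort_key_from_collation_elements_alt collation_elements max_level level_sep
instance (collation_elements : List (List Int)) (max_level : Int) (level_sep : Int) (out : List Int) : Decidable (Spec_sort_key_from_collation_elements collation_elements max_level level_sep out) := by unfold Spec_sort_key_from_collation_elements; infer_instance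

-- ===== CLAIM (what is proved, stated in full; the proofs are below) =====
def Claim_equal_sort_key_from_collation_elements : Prop := ∀ (collation_elements : List (List Int)) (max_level : Int) (level_sep : Int), Dom_sort_key_from_collation_elements collation_elements max_level level_sep → Pre_sort_key_from_collation_elements collation_elements max_level level_sep → Spec_sort_key_from_collation_elements collation_elements max_level level_sep (sort_key_from_collation_elements collation_elements max_level level_sep)

-- ===== LEMMAS AND PROOFS =====

-- weights contributed at level i, in input order
def pvLvl (ces : List (List Int)) (i : Nat) : List Int :=
  ces.flatMap (fun ce =>
    if i < ce.length then (if ce.getD i 0 > 0 then [ce.getD i 0] else []) else [])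

-- A's inner loop at level (i : Nat) appends exactly pvLvl ces i
lemma pvA_inner (ces : List (List Int)) (i : Nat) (sk : List Int) :
    ces.foldl
      (fun sk ce =>
        if (ce.length : Int) > (i : Int) then
          match PySem.List.pyGet? ce (i : Int) with
          | some ce_l => if ce_l > 0 then sk ++ [ce_l] else sk
          | none => sk
        else sk)
      sk = sk ++ pvLvl ces i := by
  induction ces generalizing sk with
  | nil => simp [pvLvl]
  | cons ce ces ih =>
    have hcons : pvLvl (ce :: ces) i
        = (if i < ce.length then (if ce.getD i 0 > 0 then [ce.getD i 0] else []) else [])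
          ++ pvLvl ces i := by
      simp [pvLvl]
    rw [List.foldl_cons, hcons]
    by_cases h : i < ce.length
    · have hl : (ce.length : Int) > (i : Int) := by exact_mod_cast h
      have hg : PySem.List.pyGet? ce (i : Int) = some (ce.getD i 0) := by
        rw [PySem.List.pyGet?_natCast, List.getElem?_eq_getElem h, List.getD_eq_getElem ce 0 h]
      rw [if_pos hl, hg, ih, if_pos h]
      have hred : (match some (ce.getD i 0) with
          | some ce_l => if ce_l > 0 then sk ++ [ce_l] else sk
          | none => sk) = if ce.getD i 0 > 0 then sk ++ [ce.getD i 0] else sk := rfl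
      rw [hred]
      by_cases hw : ce.getD i 0 > 0
      · rw [if_pos hw, if_pos hw, List.append_assoc]
      · rw [if_neg hw, if_neg hw, List.nil_append]
    · have hl : ¬ ((ce.length : Int) > (i : Int)) := fun hh => h (by exact_mod_cast hh)
      rw [if_neg hl, ih, if_neg h, List.nil_append]

-- mapIdx over a map of range picks out the index
lemma pvMapIdx_map_range {α : Type} (N : Nat) (g : Nat → α) (f : Nat → α → α) :
    ((List.range N).map g).mapIdx f = (List.range N).map (fun i => f i (g i)) := by
  apply List.ext_getElem
  · simp
  · intro j h1 h2
    simp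

-- B's bucket-filling pass computes pvLvl at every level
lemma pvB_buckets (ces : List (List Int)) (N : Nat) (g : Nat → List Int) :
    ces.foldl
      (fun (bs : List (List Int)) ce =>
        bs.mapIdx (fun level b =>
          if level < ce.length then
            (if ce.getD level 0 > 0 then b ++ [ce.getD level 0] else b)
          else b))
      ((List.range N).map g)
    = (List.range N).map (fun i => g i ++ pvLvl ces i) := by
  induction ces generalizing g with
  | nil => simp [pvLvl]
  | cons ce ces ih =>
    simp only [List.foldl_cons]
    rw [pvMapIdx_map_range]
    have hstep : (List.range N).map (fun i =>
        if i < ce.length then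
          (if ce.getD i 0 > 0 then g i ++ [ce.getD i 0] else g i)
        else g i)
        = (List.range N).map (fun i => g i ++
            (if i < ce.length then (if ce.getD i 0 > 0 then [ce.getD i 0] else []) else [])) := by
      apply List.map_congr_left
      intro i _
      by_cases h : i < ce.length
      · rw [if_pos h, if_pos h]
        by_cases hw : ce.getD i 0 > 0
        · rw [if_pos hw, if_pos hw]
        · rw [if_neg hw, if_neg hw, List.append_nil]
      · rw [if_neg h, if_neg h, List.append_nil]
    rw [hstep, ih]
    apply List.map_congr_left
    intro i _
    simp [pvLvl, List.append_assoc]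

-- generic assembly equality: A's sep-before-nonfirst-level fold equals B's bucket join
lemma pvJoin (N : Nat) (sep : Int) (g : Nat → List Int) :
    (List.range N).foldl (fun sk i => (if 0 < i then sk ++ [sep] else sk) ++ g i) []
    = (match (List.range N).map g with
       | [] => []
       | b0 :: rest => rest.foldl (fun acc b => acc ++ sep :: b) b0) := by
  cases N with
  | zero => simp
  | succ m =>
    rw [List.range_succ_eq_map]
    simp only [List.map_cons, List.foldl_cons, List.foldl_map]
    have h1 : (List.range m).foldl
          (fun sk i => (if 0 < Nat.succ i then sk ++ [sep] else sk) ++ g (Nat.succ i)) (g 0)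
        = (List.range m).foldl (fun acc i => acc ++ sep :: g (Nat.succ i)) (g 0) := by
      apply PySem.List.foldl_congr_mem
      intro sk i _
      rw [if_pos (Nat.succ_pos i), List.append_assoc, List.singleton_append]
    simpa using h1

-- pyRange 0 n 1 enumerated as Nat indices, for every Int n
lemma pvRange_toNat (n : Int) :
    PySem.List.pyRange 0 n 1 = List.map (fun k : Nat => (k : Int)) (List.range n.toNat) := by
  rw [PySem.List.pyRange_one, Int.sub_zero]
  exact List.map_congr_left (fun k _ => by simp)

theorem pv_main (ces : List (List Int)) (max_level level_sep : Int) (h : ces ≠ []) :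
    sort_key_from_collation_elements ces max_level level_sep
    = sort_key_from_collation_elements_alt ces max_level level_sep := by
  unfold sort_key_from_collation_elements sort_key_from_collation_elements_alt
  obtain ⟨ce0, ces', rfl⟩ := List.exists_cons_of_ne_nil h
  rw [List.map_cons, PySem.List.max?_id_cons]
  set available := (List.map (fun ce => (ce.length : Int)) ces').foldl max ((ce0.length : Int)) with havail
  set ces := ce0 :: ces' with hces
  set N := (min max_level available).toNat with hN
  simp only []
  -- A side: fold over levels, each inner pass characterised by pvA_inner
  have hA : (PySem.List.pyRange 0 (min max_level available) 1).foldl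
      (fun sk level =>
        ces.foldl
          (fun sk ce =>
            if (ce.length : Int) > level then
              match PySem.List.pyGet? ce level with
              | some ce_l => if ce_l > 0 then sk ++ [ce_l] else sk
              | none => sk
            else sk)
          (if level > 0 then sk ++ [level_sep] else sk))
      []
      = (List.range N).foldl (fun sk i => (if 0 < i then sk ++ [level_sep] else sk) ++ pvLvl ces i) [] := by
    rw [pvRange_toNat, List.foldl_map]
    apply PySem.List.foldl_congr_mem
    intro sk i _

    rw [pvA_inner]
    by_cases hi : 0 < i
    · rw [if_pos hi, if_pos (show ((i : Int) > 0) by exact_mod_cast hi)]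
    · rw [if_neg hi, if_neg (show ¬ ((i : Int) > 0) from fun hh => hi (by exact_mod_cast hh))]
  -- B side: the bucket fold is pvLvl at every level
  have hrepl : List.replicate N ([] : List Int) = (List.range N).map (fun _ => []) := by
    rw [List.map_const', List.length_range]
  have hB : ces.foldl
      (fun (bs : List (List Int)) ce =>
        bs.mapIdx (fun level b =>
          if level < ce.length then
            (if ce.getD level 0 > 0 then b ++ [ce.getD level 0] else b)
          else b))
      (List.replicate N [])
      = (List.range N).map (fun i => pvLvl ces i) := by
    rw [hrepl, pvB_buckets]
    simp
  rw [hA, hB, pvJoin N level_sep (fun i => pvLvl ces i)]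

-- ===== VERDICT (by name: the statement is the Claim_ definition above) =====
theorem sort_key_from_collation_elements_spec : Claim_equal_sort_key_from_collation_elements := by
  intro ces ml ls _ hpre
  unfold Spec_sort_key_from_collation_elements
  exact pv_main ces ml ls hpre
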